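-- pv_equiv track=rewrite | github.com/KazukiIsono/RSA | RSAsimulation.py | message_to_number
-- ===== SOURCE A (Python) =====
-- character = list('0123456789ABCDEFGHIJKLMNOPQRSTUVWXYZabcdefghijklmnopqrstuvwxyz!?#$%&"\'\\+*/. ')
--
-- char_to_value = {char: idx for idx, char in enumerate(character)} #文字から数字の割り当て
--
-- def message_to_number(message):
--     base = len(character)
--     number = 0
--
--     # 文字列を逆順に処理（最下位桁から順に計算）
--     for idx, char in enumerate(reversed(message)):
--         # 文字を数値に変換
--         char_value = char_to_value[char]
--
--         # 基数のべき乗を計算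
--         power = base ** idx
--
--         # 数値を加算
--         number += char_value * power
--     return number
-- ===== SOURCE B (Python) =====
-- _CHARACTERS = '0123456789ABCDEFGHIJKLMNOPQRSTUVWXYZabcdefghijklmnopqrstuvwxyz!?#$%&"\'\\+*/. '
-- _CHAR_VALUE = {c: i for i, c in enumerate(_CHARACTERS)}
-- _BASE = len(_CHARACTERS)
--
-- def message_to_number(message):
--     # Horner's method: one forward pass, no power computations.
--     number = 0
--     for ch in message:
--         number = number * _BASE + _CHAR_VALUE[ch]
--     return number
-- ===== Notes on version B (the rewrite author's own statement) =====
-- stated objective: faster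
-- what changed: Replaces the reversed-enumerate loop that recomputes base**idx at every position with a single forward Horner pass (number = number*base + value), eliminating all power computations.
import Mathlib
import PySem

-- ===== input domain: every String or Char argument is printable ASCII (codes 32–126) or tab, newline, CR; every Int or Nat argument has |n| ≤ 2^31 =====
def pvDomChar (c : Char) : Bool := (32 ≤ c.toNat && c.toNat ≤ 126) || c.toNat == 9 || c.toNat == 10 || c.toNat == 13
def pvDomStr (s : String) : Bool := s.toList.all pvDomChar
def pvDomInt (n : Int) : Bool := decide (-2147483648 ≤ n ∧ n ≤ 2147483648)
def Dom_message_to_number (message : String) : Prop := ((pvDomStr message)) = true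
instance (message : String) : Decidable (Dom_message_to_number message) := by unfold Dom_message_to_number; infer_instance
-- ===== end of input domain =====

-- B replaces A's reversed loop with per-digit power computations by a single forward Horner pass (faster).

-- ===== PORT A =====
-- module-level: character = list('…76 symbols…')
def pvCharacter : List Char :=
  "0123456789ABCDEFGHIJKLMNOPQRSTUVWXYZabcdefghijklmnopqrstuvwxyz!?#$%&\"'\\+*/. ".toList

-- module-level: char_to_value = {char: idx for idx, char in enumerate(character)}
def pvCharToValue : PySem.Dict Char Int :=
  PySem.Dict.ofList ((PySem.List.enumerate pvCharacter 0).map (fun p => (p.2, p.1)))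

def message_to_number (message : String) : Int :=
  let base : Int := (pvCharacter.length : Int)
  (PySem.List.enumerate message.toList.reverse 0).foldl
    (fun number p => number + (pvCharToValue.getD p.2 0) * base ^ p.1.toNat) 0

-- ===== PORT B =====
def message_to_number_alt (message : String) : Int :=
  message.toList.foldl
    (fun number c => number * (pvCharacter.length : Int) + pvCharToValue.getD c 0) 0

-- ===== PRECONDITION & SPEC =====
-- Pre_ excludes messages containing a character outside the 76-symbol alphabet: there the
-- Python A raises KeyError (char_to_value[char]) and returns nothing.
def Pre_message_to_number (message : String) : Prop :=
  (message.toList.all (fun c => pvCharacter.contains c)) = true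
instance (message : String) : Decidable (Pre_message_to_number message) := by
  unfold Pre_message_to_number; infer_instance

def pvWitness_message_to_number : String := "Hello World!"

def Spec_message_to_number (message : String) (out : Int) : Prop := out = message_to_number_alt message
instance (message : String) (out : Int) : Decidable (Spec_message_to_number message out) := by unfold Spec_message_to_number; infer_instance

-- ===== CLAIM (what is proved, stated in full; the proofs are below) =====
def Claim_equal_message_to_number : Prop := ∀ (message : String), Dom_message_to_number message → Pre_message_to_number message → Spec_message_to_number message (message_to_number message)

-- ===== LEMMAS AND PROOFS =====

-- LSB-first value of a digit list starting at exponent k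
def pvRevVal (v : Char → Int) (b : Int) (k : Nat) : List Char → Int
  | [] => 0
  | c :: cs => v c * b ^ k + pvRevVal v b (k + 1) cs

-- MSB-first value of a digit list
def pvVal (v : Char → Int) (b : Int) : List Char → Int
  | [] => 0
  | c :: cs => v c * b ^ cs.length + pvVal v b cs

theorem pvA_fold (v : Char → Int) (b : Int) :
    ∀ (l : List Char) (k : Nat) (n : Int),
      (PySem.List.enumerate l (k : Int)).foldl
        (fun number p => number + v p.2 * b ^ p.1.toNat) n
      = n + pvRevVal v b k l := by
  intro l
  induction l with
  | nil => intro k n; simp [PySem.List.enumerate_nil, pvRevVal]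
  | cons c cs ih =>
    intro k n
    rw [PySem.List.enumerate_cons]
    have h1 : ((k : Int) + 1) = ((k + 1 : Nat) : Int) := by push_cast; ring
    simp only [List.foldl_cons, h1, ih]
    have h2 : ((k : Int)).toNat = k := Int.toNat_natCast k
    rw [h2, pvRevVal]
    ring

theorem pvRevVal_append (v : Char → Int) (b : Int) :
    ∀ (cs : List Char) (k : Nat) (c : Char),
      pvRevVal v b k (cs ++ [c]) = pvRevVal v b k cs + v c * b ^ (k + cs.length) := by
  intro cs
  induction cs with
  | nil => intro k c; simp [pvRevVal]
  | cons d ds ih =>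
    intro k c
    simp only [List.cons_append, pvRevVal, ih]
    have : k + 1 + ds.length = k + (d :: ds).length := by simp; omega
    rw [this]
    ring

theorem pvRevVal_reverse (v : Char → Int) (b : Int) :
    ∀ (l : List Char), pvRevVal v b 0 l.reverse = pvVal v b l := by
  intro l
  induction l with
  | nil => simp [pvRevVal, pvVal]
  | cons c cs ih =>
    rw [List.reverse_cons, pvRevVal_append, ih, pvVal]
    simp [List.length_reverse]
    ring

theorem pvHorner_fold (v : Char → Int) (b : Int) :
    ∀ (l : List Char) (n : Int),
      l.foldl (fun number c => number * b + v c) n = n * b ^ l.length + pvVal v b l := by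
  intro l
  induction l with
  | nil => intro n; simp [pvVal]
  | cons c cs ih =>
    intro n
    simp only [List.foldl_cons, ih, pvVal, List.length_cons]
    ring

-- ===== VERDICT (by name: the statement is the Claim_ definition above) =====
theorem message_to_number_spec : Claim_equal_message_to_number := by
  intro message _ _
  unfold Spec_message_to_number message_to_number message_to_number_alt
  set v : Char → Int := fun c => pvCharToValue.getD c 0 with hv
  set b : Int := (pvCharacter.length : Int) with hb
  have hA := pvA_fold v b message.toList.reverse 0 0
  have hB := pvHorner_fold v b message.toList 0
  simp only [Nat.cast_zero] at hA
  rw [hA, hB, pvRevVal_reverse]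
  ring
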